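-- pv_equiv track=rewrite | github.com/Zhonghao1995/agentic-swmm-workflow | agentic_swmm/agent/reporting.py | _what_you_got
-- ===== SOURCE A (Python) =====
-- from typing import Any
--
-- _ARTIFACT_KIND_LABELS = {
--     "input": "Inputs",
--     "run": "Run output",
--     "plot": "Plots",
--     "audit": "Audit",
--     "other": "Other artifacts",
-- }
--
-- def _what_you_got(results: list[dict[str, Any]]) -> list[str]:
--     """Group artifact paths by kind for the reader."""
--     grouped: dict[str, list[str]] = {}
--     for result in results:
--         path = result.get("path")
--         if not path:
--             continue
--         kind = _classify_artifact(result, path)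
--         grouped.setdefault(kind, []).append(str(path))
--     if not grouped:
--         return []
--     lines: list[str] = []
--     for kind in ("input", "run", "plot", "audit", "other"):
--         if kind not in grouped:
--             continue
--         lines.append(f"- **{_ARTIFACT_KIND_LABELS[kind]}**")
--         for item in grouped[kind]:
--             lines.append(f"    - `{item}`")
--     return lines
--
-- def _classify_artifact(result: dict[str, Any], path: str) -> str:
--     tool = str(result.get("tool", "")).lower()
--     path_lower = str(path).lower()
--     if tool == "plot_run" or path_lower.endswith(".png") or "/07_plots/" in path_lower:
--         return "plot"
--     if tool == "audit_run" or "/09_audit" in path_lower or "audit_note" in path_lower: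
--         return "audit"
--     if tool == "run_swmm_inp" or path_lower.endswith((".out", ".rpt")):
--         return "run"
--     if path_lower.endswith((".inp", ".csv", ".json")) or tool in {"read_file", "format_rainfall", "build_inp"}:
--         return "input"
--     return "other"
-- ===== SOURCE B (Python) =====
-- from typing import Any
--
-- _KIND_ORDER = (
--     ("input", "Inputs"),
--     ("run", "Run output"),
--     ("plot", "Plots"),
--     ("audit", "Audit"),
--     ("other", "Other artifacts"),
-- )
--
-- def _classify_artifact(result: dict[str, Any], path: str) -> str:
--     tool = str(result.get("tool", "")).lower()
--     path_lower = str(path).lower()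
--     if tool == "plot_run" or path_lower.endswith(".png") or "/07_plots/" in path_lower:
--         return "plot"
--     if tool == "audit_run" or "/09_audit" in path_lower or "audit_note" in path_lower:
--         return "audit"
--     if tool == "run_swmm_inp" or path_lower.endswith((".out", ".rpt")):
--         return "run"
--     if path_lower.endswith((".inp", ".csv", ".json")) or tool in {"read_file", "format_rainfall", "build_inp"}:
--         return "input"
--     return "other"
--
-- def _what_you_got(results: list[dict[str, Any]]) -> list[str]:
--     """Group artifact paths by kind for the reader (kind-by-kind re-scan, no dict)."""
--     lines: list[str] = []
--     for kind, label in _KIND_ORDER: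
--         items: list[str] = []
--         for result in results:
--             path = result.get("path")
--             if path and _classify_artifact(result, path) == kind:
--                 items.append(str(path))
--         if items:
--             lines.append(f"- **{label}**")
--             lines.extend(f"    - `{item}`" for item in items)
--     return lines
-- ===== Notes on version B (the rewrite author's own statement) =====
-- stated objective: alternative
-- what changed: Drops the grouping dict and the kind-membership emit pass: B loops over the fixed (kind,label) order and re-scans the results list once per kind, collecting matching paths directly and emitting header+items when non-empty.
import Mathlib
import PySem

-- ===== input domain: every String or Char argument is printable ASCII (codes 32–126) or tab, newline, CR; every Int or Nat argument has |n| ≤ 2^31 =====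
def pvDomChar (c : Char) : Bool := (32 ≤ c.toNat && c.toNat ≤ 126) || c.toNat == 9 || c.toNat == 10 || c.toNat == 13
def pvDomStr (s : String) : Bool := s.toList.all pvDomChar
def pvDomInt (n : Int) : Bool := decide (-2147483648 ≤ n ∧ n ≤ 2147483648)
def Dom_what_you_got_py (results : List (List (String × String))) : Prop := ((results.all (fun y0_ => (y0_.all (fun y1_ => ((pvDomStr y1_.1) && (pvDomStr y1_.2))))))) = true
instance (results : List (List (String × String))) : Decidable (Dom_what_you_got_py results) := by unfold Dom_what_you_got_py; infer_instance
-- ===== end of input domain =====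

-- B re-arranges the same exact computation (no dict; one re-scan of results per fixed kind): alternative decomposition, same output.

-- shared module helper `_classify_artifact` (used by both A and B, as in the Python module)
def classifyArtifact (result : PySem.Dict String String) (path : String) : String :=
  let tool := PySem.Str.lower (result.getD "tool" "")
  let pathLower := PySem.Str.lower path
  if tool == "plot_run" || PySem.Str.endswith pathLower ".png" || PySem.Str.isIn "/07_plots/" pathLower then "plot"
  else if tool == "audit_run" || PySem.Str.isIn "/09_audit" pathLower || PySem.Str.isIn "audit_note" pathLower then "audit"
  else if tool == "run_swmm_inp" || PySem.Str.endswith pathLower ".out" || PySem.Str.endswith pathLower ".rpt" then "run"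
  else if PySem.Str.endswith pathLower ".inp" || PySem.Str.endswith pathLower ".csv" || PySem.Str.endswith pathLower ".json"
       || tool == "read_file" || tool == "format_rainfall" || tool == "build_inp" then "input"
  else "other"

-- ===== PORT A =====
-- _ARTIFACT_KIND_LABELS (keys used below are always present, so getD never falls back)
def artifactKindLabels : PySem.Dict String String :=
  PySem.Dict.ofList [("input", "Inputs"), ("run", "Run output"), ("plot", "Plots"), ("audit", "Audit"), ("other", "Other artifacts")]

-- the grouping loop body: grouped.setdefault(kind, []).append(str(path)) = grouped[kind] = grouped.get(kind, []) + [path]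
def groupStep (g : PySem.Dict String (List String)) (result : List (String × String)) : PySem.Dict String (List String) :=
  let d := PySem.Dict.ofList result
  match d.get? "path" with
  | none => g
  | some path => if path == "" then g else g.modify (classifyArtifact d path) [] (· ++ [path])

def what_you_got_py (results : List (List (String × String))) : List String :=
  let grouped := results.foldl groupStep PySem.Dict.empty
  if grouped.size == 0 then []
  else
    ["input", "run", "plot", "audit", "other"].foldl (fun lines kind =>
      if grouped.contains kind then
        (lines ++ ["- **" ++ artifactKindLabels.getD kind "" ++ "**"])
          ++ (grouped.getD kind []).map (fun item => "    - `" ++ item ++ "`")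
      else lines) []

-- ===== PORT B =====
-- inner loop of B: one scan of results collecting paths of this kind
-- inner-loop body of B (one result, one kind)
def collectStep (kind : String) (items : List String) (result : List (String × String)) : List String :=
  let d := PySem.Dict.ofList result
  match d.get? "path" with
  | none => items
  | some path =>
      if path == "" then items
      else if classifyArtifact d path == kind then items ++ [path] else items

def collectKind (results : List (List (String × String))) (kind : String) : List String :=
  results.foldl (collectStep kind) []

def what_you_got_py_alt (results : List (List (String × String))) : List String :=
  [("input", "Inputs"), ("run", "Run output"), ("plot", "Plots"), ("audit", "Audit"), ("other", "Other artifacts")].foldl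
    (fun lines kl =>
      let items := collectKind results kl.1
      if items.isEmpty then lines
      else (lines ++ ["- **" ++ kl.2 ++ "**"]) ++ items.map (fun item => "    - `" ++ item ++ "`")) []

-- ===== PRECONDITION & SPEC =====
def Spec_what_you_got_py (results : List (List (String × String))) (out : List String) : Prop := out = what_you_got_py_alt results
instance (results : List (List (String × String))) (out : List String) : Decidable (Spec_what_you_got_py results out) := by unfold Spec_what_you_got_py; infer_instance

-- ===== CLAIM (what is proved, stated in full; the proofs are below) =====
def Claim_equal_what_you_got_py : Prop := ∀ (results : List (List (String × String))), Dom_what_you_got_py results → Spec_what_you_got_py results (what_you_got_py results)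

-- ===== LEMMAS AND PROOFS =====

-- what one result contributes to kind k
def sel (k : String) (result : List (String × String)) : Option String :=
  let d := PySem.Dict.ofList result
  match d.get? "path" with
  | none => none
  | some path =>
      if path == "" then none
      else if classifyArtifact d path == k then some path else none

lemma filterMap_sel_cons (k : String) (r : List (String × String)) (t : List (List (String × String))) :
    (r :: t).filterMap (sel k) = (sel k r).toList ++ t.filterMap (sel k) := by
  cases h : sel k r <;> simp [h]

lemma collectStep_eq (k : String) (items : List String) (r : List (String × String)) :
    collectStep k items r = items ++ (sel k r).toList := by
  unfold collectStep sel
  cases h : (PySem.Dict.ofList r).get? "path" with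
  | none => simp [h]
  | some p =>
    by_cases hp : p = ""
    · simp [h, hp]
    · by_cases hk : classifyArtifact (PySem.Dict.ofList r) p = k
      · simp [h, hp, hk]
      · simp [h, hp, hk]

lemma getD_groupStep (g : PySem.Dict String (List String)) (r : List (String × String)) (k : String) :
    (groupStep g r).getD k [] = g.getD k [] ++ (sel k r).toList := by
  unfold groupStep sel
  cases h : (PySem.Dict.ofList r).get? "path" with
  | none => simp [h]
  | some p =>
    by_cases hp : p = ""
    · simp [h, hp]
    · by_cases hk : k = classifyArtifact (PySem.Dict.ofList r) p
      · simp [h, hp, hk.symm]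
      · have hk2 : ¬ (classifyArtifact (PySem.Dict.ofList r) p = k) := fun e => hk e.symm
        simp [h, hp, hk2, PySem.Dict.getD_modify, hk]

lemma contains_groupStep (g : PySem.Dict String (List String)) (r : List (String × String)) (k : String) :
    (groupStep g r).contains k = (g.contains k || (sel k r).isSome) := by
  unfold groupStep sel
  cases h : (PySem.Dict.ofList r).get? "path" with
  | none => simp [h]
  | some p =>
    by_cases hp : p = ""
    · simp [h, hp]
    · by_cases hk : k = classifyArtifact (PySem.Dict.ofList r) p
      · simp [h, hp, hk.symm, PySem.Dict.contains_modify]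
      · have hk2 : ¬ (classifyArtifact (PySem.Dict.ofList r) p = k) := fun e => hk e.symm
        simp [h, hp, hk2, PySem.Dict.contains_modify, hk]

lemma collect_aux (k : String) (l : List (List (String × String))) (items : List String) :
    l.foldl (collectStep k) items = items ++ l.filterMap (sel k) := by
  induction l generalizing items with
  | nil => simp
  | cons r t ih =>
    rw [List.foldl_cons, collectStep_eq, ih, filterMap_sel_cons, List.append_assoc]

lemma collectKind_eq (results : List (List (String × String))) (k : String) :
    collectKind results k = results.filterMap (sel k) := by
  unfold collectKind
  rw [collect_aux]
  rfl

lemma getD_fold (l : List (List (String × String))) (g : PySem.Dict String (List String)) (k : String) :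
    (l.foldl groupStep g).getD k [] = g.getD k [] ++ l.filterMap (sel k) := by
  induction l generalizing g with
  | nil => simp
  | cons r t ih =>
    rw [List.foldl_cons, ih, getD_groupStep, filterMap_sel_cons, List.append_assoc]

lemma contains_fold (l : List (List (String × String))) (g : PySem.Dict String (List String)) (k : String) :
    (l.foldl groupStep g).contains k = (g.contains k || !(l.filterMap (sel k)).isEmpty) := by
  induction l generalizing g with
  | nil => simp
  | cons r t ih =>
    rw [List.foldl_cons, ih, contains_groupStep, filterMap_sel_cons]
    cases h2 : sel k r <;> simp [h2]

lemma contains_of_items_nil (d : PySem.Dict String (List String)) (h : d.items = []) (k : String) :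
    d.contains k = false := by
  obtain ⟨l⟩ := d
  subst h
  rfl

-- ===== VERDICT (by name: the statement is the Claim_ definition above) =====
theorem what_you_got_py_spec : Claim_equal_what_you_got_py := by
  intro results _
  unfold Spec_what_you_got_py what_you_got_py what_you_got_py_alt
  have hco : ∀ k, (results.foldl groupStep PySem.Dict.empty).contains k
      = !(results.filterMap (sel k)).isEmpty := by
    intro k; rw [contains_fold]; simp
  have hgd : ∀ k, (results.foldl groupStep PySem.Dict.empty).getD k []
      = results.filterMap (sel k) := by
    intro k; rw [getD_fold]; simp
  by_cases hz : (results.foldl groupStep PySem.Dict.empty).size = 0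
  · have hnil : (results.foldl groupStep PySem.Dict.empty).items = [] := by
      have := hz; unfold PySem.Dict.size at this
      exact List.eq_nil_of_length_eq_zero this
    have hall : ∀ k, (results.filterMap (sel k)).isEmpty = true := by
      intro k
      have h1 := hco k
      rw [contains_of_items_nil _ hnil] at h1
      cases h2 : (results.filterMap (sel k)).isEmpty
      · rw [h2] at h1; simp at h1
      · rfl
    simp [collectKind_eq, hz, List.foldl, hall]
  · simp only [collectKind_eq, List.foldl, hco, hgd]
    rw [if_neg (by simpa using hz)]
    cases e1 : (results.filterMap (sel "input")).isEmpty <;>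
    cases e2 : (results.filterMap (sel "run")).isEmpty <;>
    cases e3 : (results.filterMap (sel "plot")).isEmpty <;>
    cases e4 : (results.filterMap (sel "audit")).isEmpty <;>
    cases e5 : (results.filterMap (sel "other")).isEmpty <;>
      simp [artifactKindLabels, e1, e2, e3, e4, e5] <;> decide
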